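-- pv_equiv track=rewrite | github.com/jlillywh/GSswmm | generate_mapping_simple.py | parse_output_spec
-- ===== SOURCE A (Python) =====
-- def parse_output_spec(spec, sections):
--     """Parse output specification - just a name, auto-detect type and property."""
--     name = spec.strip()
--
--     # Check what type of element this is and assign default property
--     for line in sections.get('SUBCATCHMENTS', []):
--         if len(line) >= 1 and line[0] == name:
--             return {'name': name, 'object_type': 'SUBCATCH', 'property': 'RUNOFF'}
--
--     for line in sections.get('STORAGE', []):
--         if len(line) >= 1 and line[0] == name:
--             # Default to VOLUME for storage
--             return {'name': name, 'object_type': 'STORAGE', 'property': 'VOLUME'}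
--
--     for line in sections.get('JUNCTIONS', []):
--         if len(line) >= 1 and line[0] == name:
--             return {'name': name, 'object_type': 'JUNCTION', 'property': 'INFLOW'}
--
--     for line in sections.get('OUTFALLS', []):
--         if len(line) >= 1 and line[0] == name:
--             return {'name': name, 'object_type': 'OUTFALL', 'property': 'FLOW'}
--
--     for line in sections.get('PUMPS', []):
--         if len(line) >= 1 and line[0] == name:
--             return {'name': name, 'object_type': 'PUMP', 'property': 'FLOW'}
--
--     for line in sections.get('ORIFICES', []):
--         if len(line) >= 1 and line[0] == name:
--             return {'name': name, 'object_type': 'ORIFICE', 'property': 'FLOW'}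
--
--     for line in sections.get('WEIRS', []):
--         if len(line) >= 1 and line[0] == name:
--             return {'name': name, 'object_type': 'WEIR', 'property': 'FLOW'}
--
--     for line in sections.get('CONDUITS', []):
--         if len(line) >= 1 and line[0] == name:
--             return {'name': name, 'object_type': 'CONDUIT', 'property': 'FLOW'}
--
--     raise ValueError(f"Output element '{name}' not found in model")
-- ===== SOURCE B (Python) =====
-- def parse_output_spec(spec, sections):
--     """Parse output specification - just a name, auto-detect type and property."""
--     # Build one index over all eight section groups, iterated in reverse
--     # priority order so the highest-priority section wins for duplicate names.
--     index = {}
--     for key, obj_type, prop in (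
--         ('CONDUITS', 'CONDUIT', 'FLOW'), ('WEIRS', 'WEIR', 'FLOW'),
--         ('ORIFICES', 'ORIFICE', 'FLOW'), ('PUMPS', 'PUMP', 'FLOW'),
--         ('OUTFALLS', 'OUTFALL', 'FLOW'), ('JUNCTIONS', 'JUNCTION', 'INFLOW'),
--         ('STORAGE', 'STORAGE', 'VOLUME'), ('SUBCATCHMENTS', 'SUBCATCH', 'RUNOFF')):
--         for line in sections.get(key, []):
--             if len(line) >= 1:
--                 index[line[0]] = (obj_type, prop)
--     name = spec.strip()
--     if name in index:
--         obj_type, prop = index[name]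
--         return {'name': name, 'object_type': obj_type, 'property': prop}
--     raise ValueError(f"Output element '{name}' not found in model")
-- ===== Notes on version B (the rewrite author's own statement) =====
-- stated objective: idiomatic
-- what changed: B replaces A's eight sequential priority scans with one pass that builds a dict index from element name to (type, property), populated in reverse priority order so overwriting reproduces A's priority, followed by a single lookup.
import Mathlib
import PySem

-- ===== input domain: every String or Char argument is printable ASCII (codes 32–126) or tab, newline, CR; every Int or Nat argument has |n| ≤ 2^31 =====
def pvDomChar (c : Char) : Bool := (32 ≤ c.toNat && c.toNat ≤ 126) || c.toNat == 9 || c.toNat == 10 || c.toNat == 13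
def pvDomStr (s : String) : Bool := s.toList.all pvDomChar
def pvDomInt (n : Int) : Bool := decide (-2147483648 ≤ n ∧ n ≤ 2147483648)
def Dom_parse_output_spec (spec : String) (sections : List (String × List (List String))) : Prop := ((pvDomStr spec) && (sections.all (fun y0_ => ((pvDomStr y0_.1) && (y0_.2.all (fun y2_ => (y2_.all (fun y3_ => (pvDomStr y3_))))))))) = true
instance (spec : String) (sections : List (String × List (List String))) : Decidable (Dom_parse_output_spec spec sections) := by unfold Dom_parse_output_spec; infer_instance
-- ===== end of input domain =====

-- B replaces A's eight sequential priority scans with one dict index built in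
-- reverse priority order plus a single lookup (objective: idiomatic).

-- ===== PORT A =====
-- one 'for line in …: if len(line) >= 1 and line[0] == name: return …' loop,
-- as a Bool: does some line match?
def pvFound (lines : List (List String)) (name : String) : Bool :=
  match lines with
  | [] => false
  | l :: rest =>
      if decide (1 ≤ l.length) && (PySem.List.pyGet? l 0 == some name) then true
      else pvFound rest name

-- the returned dict literal {'name': …, 'object_type': …, 'property': …}
def pvRes (name ty pr : String) : List (String × String) :=
  [("name", name), ("object_type", ty), ("property", pr)]

def parse_output_spec (spec : String) (sections : List (String × List (List String))) : List (String × String) :=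
  let name := PySem.Str.strip spec
  let d := PySem.Dict.mk sections
  if pvFound (d.getD "SUBCATCHMENTS" []) name then pvRes name "SUBCATCH" "RUNOFF"
  else if pvFound (d.getD "STORAGE" []) name then pvRes name "STORAGE" "VOLUME"
  else if pvFound (d.getD "JUNCTIONS" []) name then pvRes name "JUNCTION" "INFLOW"
  else if pvFound (d.getD "OUTFALLS" []) name then pvRes name "OUTFALL" "FLOW"
  else if pvFound (d.getD "PUMPS" []) name then pvRes name "PUMP" "FLOW"
  else if pvFound (d.getD "ORIFICES" []) name then pvRes name "ORIFICE" "FLOW"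
  else if pvFound (d.getD "WEIRS" []) name then pvRes name "WEIR" "FLOW"
  else if pvFound (d.getD "CONDUITS" []) name then pvRes name "CONDUIT" "FLOW"
  else []  -- raises ValueError here: excluded by Pre_parse_output_spec

-- ===== PORT B =====
-- the eight section groups in REVERSE priority order (last write wins)
def pvTable : List (String × String × String) :=
  [("CONDUITS", "CONDUIT", "FLOW"), ("WEIRS", "WEIR", "FLOW"),
   ("ORIFICES", "ORIFICE", "FLOW"), ("PUMPS", "PUMP", "FLOW"),
   ("OUTFALLS", "OUTFALL", "FLOW"), ("JUNCTIONS", "JUNCTION", "INFLOW"),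
   ("STORAGE", "STORAGE", "VOLUME"), ("SUBCATCHMENTS", "SUBCATCH", "RUNOFF")]

def pvBuildIndex (sections : List (String × List (List String))) : PySem.Dict String (String × String) :=
  pvTable.foldl
    (fun idx e =>
      ((PySem.Dict.mk sections).getD e.1 []).foldl
        (fun idx l =>
          match l with
          | [] => idx
          | x :: _ => idx.insert x e.2)
        idx)
    PySem.Dict.empty

def parse_output_spec_alt (spec : String) (sections : List (String × List (List String))) : List (String × String) :=
  let name := PySem.Str.strip spec
  match (pvBuildIndex sections).get? name with
  | some tp => [("name", name), ("object_type", tp.1), ("property", tp.2)]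
  | none => []  -- raises ValueError here: excluded by Pre_parse_output_spec

-- ===== PRECONDITION & SPEC =====
-- Pre_ excludes exactly the inputs on which A (and B) raises ValueError:
-- the stripped name heads no line of any of the eight section groups.
def Pre_parse_output_spec (spec : String) (sections : List (String × List (List String))) : Prop :=
  (["SUBCATCHMENTS", "STORAGE", "JUNCTIONS", "OUTFALLS",
    "PUMPS", "ORIFICES", "WEIRS", "CONDUITS"].any (fun k =>
      ((PySem.Dict.mk sections).getD k []).any
        (fun l => l.head? == some (PySem.Str.strip spec)))) = true

instance (spec : String) (sections : List (String × List (List String))) : Decidable (Pre_parse_output_spec spec sections) := by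
  unfold Pre_parse_output_spec; infer_instance

def pvWitness_parse_output_spec : String × (List (String × List (List String))) :=
  (" J1 ", [("JUNCTIONS", [["J1", "0"]]), ("CONDUITS", [["C1"]])])

def Spec_parse_output_spec (spec : String) (sections : List (String × List (List String))) (out : List (String × String)) : Prop := out = parse_output_spec_alt spec sections
instance (spec : String) (sections : List (String × List (List String))) (out : List (String × String)) : Decidable (Spec_parse_output_spec spec sections out) := by unfold Spec_parse_output_spec; infer_instance

-- ===== CLAIM (what is proved, stated in full; the proofs are below) =====
def Claim_equal_parse_output_spec : Prop := ∀ (spec : String) (sections : List (String × List (List String))), Dom_parse_output_spec spec sections → Pre_parse_output_spec spec sections → Spec_parse_output_spec spec sections (parse_output_spec spec sections)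

-- ===== LEMMAS AND PROOFS =====

-- one section's inner fold: lookup of `name` afterwards is `v` iff some line matches
theorem pv_inner (lines : List (List String)) (v : String × String) (name : String)
    (idx : PySem.Dict String (String × String)) :
    (lines.foldl (fun idx l => match l with | [] => idx | x :: _ => idx.insert x v) idx).get? name
      = if pvFound lines name then some v else idx.get? name := by
  induction lines generalizing idx with
  | nil => simp [pvFound]
  | cons l rest ih =>
    cases l with
    | nil => simpa [pvFound] using ih idx
    | cons x t =>
      simp only [List.foldl_cons, ih, pvFound, PySem.List.pyGet?_zero_cons]
      by_cases hf : pvFound rest name = true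
      · simp [hf]
      · simp only [Bool.not_eq_true] at hf
        simp only [hf, if_neg Bool.false_ne_true]
        by_cases hx : x = name
        · subst hx; simp [PySem.Dict.get?_insert_self]
        · have hx' : name ≠ x := fun h => hx h.symm
          simp [PySem.Dict.get?_insert, hx, hx']

-- the outer fold over a table: lookup = last table entry whose section matches,
-- i.e. first match in the reversed table
theorem pv_outer (sect : String → List (List String)) (name : String) :
    ∀ (table : List (String × String × String)) (idx : PySem.Dict String (String × String)),
    (table.foldl (fun idx e => ((sect e.1).foldl
        (fun idx l => match l with | [] => idx | x :: _ => idx.insert x e.2) idx)) idx).get? name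
      = match table.reverse.find? (fun e => pvFound (sect e.1) name) with
        | some e => some e.2
        | none => idx.get? name := by
  intro table
  induction table with
  | nil => intro idx; simp
  | cons e rest ih =>
    intro idx
    simp only [List.foldl_cons, ih, List.reverse_cons, List.find?_append]
    cases hr : rest.reverse.find? (fun e => pvFound (sect e.1) name) with
    | some e' => simp
    | none =>
      simp only [Option.none_or]
      rw [pv_inner]
      by_cases hf : pvFound (sect e.1) name = true
      · simp [List.find?, hf]
      · simp only [Bool.not_eq_true] at hf
        simp [List.find?, hf]

theorem parse_output_spec_eq_alt (spec : String) (sections : List (String × List (List String))) :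
    parse_output_spec spec sections = parse_output_spec_alt spec sections := by
  unfold parse_output_spec parse_output_spec_alt pvBuildIndex
  simp only []
  rw [pv_outer (fun k => (PySem.Dict.mk sections).getD k []) (PySem.Str.strip spec) pvTable]
  simp only [pvTable, List.reverse_cons, List.reverse_nil, List.nil_append, List.cons_append,
    List.find?, PySem.Dict.get?_empty]
  split_ifs <;> simp_all [pvRes]

-- ===== VERDICT (by name: the statement is the Claim_ definition above) =====
theorem parse_output_spec_spec : Claim_equal_parse_output_spec := by
  intro spec sections _ _
  unfold Spec_parse_output_spec
  exact parse_output_spec_eq_alt spec sections
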